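-- pv_equiv track=rewrite | github.com/nickth3man/nba-lab | scripts/build_graph.py | compute_era
-- ===== SOURCE A (Python) =====
-- def compute_era(first_year, last_year):
--     if first_year is None or last_year is None:
--         return "Unknown"
--
--     decades = []
--     for year in range(first_year, last_year + 1):
--         decade = (year // 10) * 10
--         if decade not in decades:
--             decades.append(decade)
--
--     if len(decades) == 1:
--         return f"{decades[0]}s"
--     elif len(decades) == 2:
--         return f"{decades[0]}s-{decades[1]}s"
--     else:
--         return f"{decades[0]}s-{decades[-1]}s"
-- ===== SOURCE B (Python) =====
-- def compute_era(first_year, last_year):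
--     if first_year is None or last_year is None:
--         return "Unknown"
--     d1 = first_year // 10 * 10
--     d2 = last_year // 10 * 10
--     if d1 == d2:
--         return f"{d1}s"
--     return f"{d1}s-{d2}s"
-- ===== Notes on version B (the rewrite author's own statement) =====
-- stated objective: faster
-- what changed: Replaces the year-by-year loop that collects distinct decades in a list with a direct O(1) computation of the first and last decade by integer division; the loop's head/last decades are exactly those.
import Mathlib
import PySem

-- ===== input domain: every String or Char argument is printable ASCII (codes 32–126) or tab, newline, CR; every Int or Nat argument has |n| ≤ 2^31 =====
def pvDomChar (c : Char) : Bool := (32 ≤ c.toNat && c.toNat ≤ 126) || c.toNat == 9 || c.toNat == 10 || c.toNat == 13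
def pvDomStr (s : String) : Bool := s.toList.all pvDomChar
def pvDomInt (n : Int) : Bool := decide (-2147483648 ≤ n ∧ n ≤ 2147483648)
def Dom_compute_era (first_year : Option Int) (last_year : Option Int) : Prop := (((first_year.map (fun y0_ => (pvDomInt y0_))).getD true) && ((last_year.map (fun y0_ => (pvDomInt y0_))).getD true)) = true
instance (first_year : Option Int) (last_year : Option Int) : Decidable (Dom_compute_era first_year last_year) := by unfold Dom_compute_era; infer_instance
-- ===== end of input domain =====

-- B computes the first and last decade directly by integer division instead of
-- looping over every year (O(1) vs O(last-first)); return value equivalence only.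

-- ===== PORT A =====
-- loop body of A's for-loop: append the decade if not yet collected
def eraStep (ds : List Int) (year : Int) : List Int :=
  let decade := PySem.Int.floordiv year 10 * 10
  if decade ∈ ds then ds else ds ++ [decade]

def compute_era (first_year : Option Int) (last_year : Option Int) : String :=
  match first_year, last_year with
  | some fy, some ly =>
    let decades := (PySem.List.pyRange fy (ly + 1) 1).foldl eraStep []
    if decades.length = 1 then
      match PySem.List.pyGet? decades 0 with
      | some d => PySem.Int.toStr d ++ "s"
      | none => ""  -- IndexError, unreachable
    else if decades.length = 2 then
      match PySem.List.pyGet? decades 0, PySem.List.pyGet? decades 1 with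
      | some d0, some d1 => PySem.Int.toStr d0 ++ "s-" ++ PySem.Int.toStr d1 ++ "s"
      | _, _ => ""  -- IndexError, unreachable
    else
      match PySem.List.pyGet? decades 0, PySem.List.pyGet? decades (-1) with
      | some d0, some d1 => PySem.Int.toStr d0 ++ "s-" ++ PySem.Int.toStr d1 ++ "s"
      | _, _ => ""  -- IndexError: empty range (first_year > last_year), excluded by Pre_
  | _, _ => "Unknown"

-- ===== PORT B =====
def compute_era_alt (first_year : Option Int) (last_year : Option Int) : String :=
  match first_year with
  | none => "Unknown"
  | some fy =>
    match last_year with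
    | none => "Unknown"
    | some ly =>
      let d1 := PySem.Int.floordiv fy 10 * 10
      let d2 := PySem.Int.floordiv ly 10 * 10
      if d1 = d2 then PySem.Int.toStr d1 ++ "s"
      else PySem.Int.toStr d1 ++ "s-" ++ PySem.Int.toStr d2 ++ "s"

-- ===== PRECONDITION & SPEC =====
-- Pre_ excludes only the inputs where A raises IndexError: both years given with
-- first_year > last_year (empty range, so decades = [] and decades[0] fails).
def Pre_compute_era (first_year : Option Int) (last_year : Option Int) : Prop :=
  (first_year.bind (fun fy => last_year.map (fun ly => decide (fy ≤ ly)))).getD true = true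
instance (first_year : Option Int) (last_year : Option Int) : Decidable (Pre_compute_era first_year last_year) := by unfold Pre_compute_era; infer_instance

def pvWitness_compute_era : Option Int × Option Int := (some 1995, some 2004)

def Spec_compute_era (first_year : Option Int) (last_year : Option Int) (out : String) : Prop := out = compute_era_alt first_year last_year
instance (first_year : Option Int) (last_year : Option Int) (out : String) : Decidable (Spec_compute_era first_year last_year out) := by unfold Spec_compute_era; infer_instance

-- ===== CLAIM (what is proved, stated in full; the proofs are below) =====
def Claim_equal_compute_era : Prop := ∀ (first_year : Option Int) (last_year : Option Int), Dom_compute_era first_year last_year → Pre_compute_era first_year last_year → Spec_compute_era first_year last_year (compute_era first_year last_year)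

-- ===== LEMMAS AND PROOFS =====

-- the decade of a year; fd_eq rewrites floor division to Euclidean division (divisor 10 > 0)
def fd (y : Int) : Int := PySem.Int.floordiv y 10 * 10

theorem fd_eq (y : Int) : fd y = y / 10 * 10 := by
  unfold fd; rw [PySem.Int.floordiv_eq_ediv_of_pos (by omega)]

theorem fd_mono {a b : Int} (h : a ≤ b) : fd a ≤ fd b := by
  rw [fd_eq, fd_eq]; omega

theorem fd_squeeze {a y b : Int} (h1 : a ≤ y) (h2 : y ≤ b) (h : fd a = fd b) : fd y = fd a := by
  have := fd_mono h1; have := fd_mono h2; omega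

-- loop invariant for A's decade-collecting loop over the inclusive year range
theorem loop_inv (a b : Int) (h : a ≤ b) :
    ∃ L, (PySem.List.pyRange a (b + 1) 1).foldl eraStep [] = L ∧
      L.head? = some (fd a) ∧ L.getLast? = some (fd b) ∧
      (∀ x ∈ L, x ≤ fd b) ∧ (L.length = 1 ↔ fd a = fd b) := by
  induction b, h using Int.le_induction with
  | base =>
    refine ⟨[fd a], ?_, rfl, rfl, ?_, by simp⟩
    · rw [PySem.List.pyRange_one_singleton]
      show eraStep [] a = [fd a]
      rfl
    · intro x hx; simp at hx; simp [hx]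
  | succ b hab ih =>
    obtain ⟨L, hL, hhead, hlast, hbound, hlen⟩ := ih
    rw [PySem.List.pyRange_one_succ_right (by omega), List.foldl_append, hL]
    have hLne : L ≠ [] := by intro h0; rw [h0] at hhead; simp at hhead
    by_cases hmem : fd (b + 1) ∈ L
    · -- decade already present: list unchanged, and fd (b+1) = fd b
      have heq : fd (b + 1) = fd b := by
        have h1 := hbound _ hmem
        have h2 := fd_mono (show b ≤ b + 1 by omega)
        omega
      have hstep : eraStep L (b + 1) = L :=
        if_pos hmem
      refine ⟨L, hstep, hhead, by rw [hlast, heq], ?_, ?_⟩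
      · intro x hx; rw [heq]; exact hbound x hx
      · rw [heq] at *; exact hlen
    · -- new decade appended
      have hne : fd a ≠ fd (b + 1) := by
        intro heq
        have hba : fd b = fd a := fd_squeeze hab (by omega) heq
        have h1 : L.length = 1 := hlen.mpr hba.symm
        obtain ⟨x, hx⟩ := List.length_eq_one_iff.mp h1
        rw [hx] at hhead hmem
        simp at hhead
        exact hmem (by simp [hhead, ← heq])
      have hstep : eraStep L (b + 1) = L ++ [fd (b + 1)] :=
        if_neg hmem
      refine ⟨L ++ [fd (b + 1)], hstep, ?_, ?_, ?_, ?_⟩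
      · match L, hLne with
        | x :: xs, _ => simp at hhead ⊢; exact hhead
      · simp
      · intro x hx
        rcases List.mem_append.mp hx with hx | hx
        · have := hbound x hx
          have := fd_mono (show b ≤ b + 1 by omega); omega
        · simp at hx; simp [hx]
      · constructor
        · intro hl
          rw [List.length_append] at hl
          simp at hl
          exact absurd hl hLne
        · intro heq; exact absurd heq hne

theorem pyGet?_one_cons_cons {α : Type} (x y : α) (ys : List α) :
    PySem.List.pyGet? (x :: y :: ys) 1 = some y := by
  simp [PySem.List.pyGet?, PySem.List.pyIdx?]

-- ===== VERDICT (by name: the statement is the Claim_ definition above) =====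
theorem compute_era_spec : Claim_equal_compute_era := by
  intro first_year last_year _ hpre
  unfold Spec_compute_era
  match first_year, last_year with
  | none, _ => cases last_year <;> rfl
  | some fy, none => rfl
  | some fy, some ly =>
    unfold Pre_compute_era at hpre
    simp at hpre
    obtain ⟨L, hL, hhead, hlast, -, hlen⟩ := loop_inv fy ly hpre
    show compute_era (some fy) (some ly) = compute_era_alt (some fy) (some ly)
    unfold compute_era compute_era_alt
    simp only [hL]
    rw [fd_eq] at hhead hlast
    match L, hhead, hlast, hlen with
    | [x], hhead, hlast, hlen =>
      have hfl : fd fy = fd ly := hlen.mp rfl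
      rw [fd_eq, fd_eq] at hfl
      simp at hhead hlast
      have hq : fy / 10 = ly / 10 := by omega
      simp [PySem.List.pyGet?_zero_cons, hhead, hq]
    | [x, y], hhead, hlast, hlen =>
      have hne : fd fy ≠ fd ly := fun he => by simpa using hlen.mpr he
      rw [fd_eq, fd_eq] at hne
      simp at hhead hlast
      have hq : ¬ (fy / 10 = ly / 10) := fun h => hne (by rw [h])
      simp [PySem.List.pyGet?_zero_cons, pyGet?_one_cons_cons, hhead, hlast, hq]
    | x :: y :: z :: ys, hhead, hlast, hlen =>
      have hne : fd fy ≠ fd ly := fun he => by simpa using hlen.mpr he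
      rw [fd_eq, fd_eq] at hne
      simp only [List.head?_cons, Option.some.injEq] at hhead
      have hq : ¬ (fy / 10 = ly / 10) := fun h => hne (by rw [h])
      have hl1 : (x :: y :: z :: ys).length ≠ 1 := by simp
      have hl2 : (x :: y :: z :: ys).length ≠ 2 := by simp
      have hg : (z :: ys).getLast? = some (ly / 10 * 10) := by
        rw [List.getLast?_cons_cons, List.getLast?_cons_cons] at hlast; exact hlast
      rw [PySem.List.pyGet?_neg_one]
      simp [hl1, hl2, hhead, hg, hq]
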